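-- pv_equiv track=rewrite | github.com/BalazsHi/AI-Projects | BANKING use cases/01_Policy compliance checker agents/agents/compliance_checker.py | _extract_policy_references
-- ===== SOURCE A (Python) =====
-- def _extract_policy_references(response: str) -> str:
--     """Extract policy references from response."""
--     lines = response.split('\n')
--     references = []
--     capture = False
--
--     for line in lines:
--         if 'policy reference' in line.lower():
--             capture = True
--             continue
--         if capture and line.strip():
--             references.append(line.strip())
--
--     return ' '.join(references) if references else "No specific policy references identified."
-- ===== SOURCE B (Python) =====
-- def _extract_policy_references(response: str) -> str:
--     """Extract policy references from response."""
--     lines = response.split('\n')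
--     idx = next((i for i, line in enumerate(lines)
--                 if 'policy reference' in line.lower()), None)
--     if idx is None:
--         return "No specific policy references identified."
--     references = [line.strip() for line in lines[idx + 1:]
--                   if line.strip() and 'policy reference' not in line.lower()]
--     return ' '.join(references) if references else "No specific policy references identified."
-- ===== Notes on version B (the rewrite author's own statement) =====
-- stated objective: simpler
-- what changed: Replaces the single stateful capture-flag loop by a two-phase decomposition: find the index of the first marker line, then a filtering comprehension over the suffix lines[idx+1:].
import Mathlib
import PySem

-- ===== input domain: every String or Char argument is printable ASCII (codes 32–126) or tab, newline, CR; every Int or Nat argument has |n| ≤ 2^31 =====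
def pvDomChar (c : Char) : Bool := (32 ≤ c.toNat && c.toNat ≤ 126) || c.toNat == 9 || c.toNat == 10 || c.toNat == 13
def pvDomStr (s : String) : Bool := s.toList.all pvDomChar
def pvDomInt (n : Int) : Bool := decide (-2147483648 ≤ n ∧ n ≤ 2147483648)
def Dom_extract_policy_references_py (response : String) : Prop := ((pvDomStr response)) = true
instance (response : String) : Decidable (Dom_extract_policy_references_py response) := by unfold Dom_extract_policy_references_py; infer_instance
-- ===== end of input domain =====

-- B replaces A's stateful capture-flag loop by "find first marker index, then filter the suffix" (simpler decomposition, same cost).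

-- shared helper: 'policy reference' in line.lower()
def pvMarker (l : List Char) : Bool := PySem.Chars.isIn "policy reference".toList (PySem.Chars.lower l)

-- one iteration of A's loop (state = (references, capture))
def pvStepA (st : List (List Char) × Bool) (line : List Char) : List (List Char) × Bool :=
  if pvMarker line then (st.1, true)
  else if st.2 && !(PySem.Chars.strip line).isEmpty then (st.1 ++ [PySem.Chars.strip line], st.2)
  else st

-- ===== PORT A =====
def extract_policy_references_py (response : String) : String :=
  let lines := PySem.Chars.splitOn response.toList "\n".toList
  let st := lines.foldl pvStepA ([], false)
  if st.1.isEmpty then "No specific policy references identified."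
  else String.ofList (PySem.Chars.join " ".toList st.1)

-- ===== PORT B =====
def extract_policy_references_py_alt (response : String) : String :=
  let lines := PySem.Chars.splitOn response.toList "\n".toList
  match lines.findIdx? pvMarker with
  | none => "No specific policy references identified."
  | some i =>
    let references := ((lines.drop (i + 1)).filter
        (fun l => !(PySem.Chars.strip l).isEmpty && !pvMarker l)).map PySem.Chars.strip
    if references.isEmpty then "No specific policy references identified."
    else String.ofList (PySem.Chars.join " ".toList references)

-- ===== PRECONDITION & SPEC =====
def Spec_extract_policy_references_py (response : String) (out : String) : Prop := out = extract_policy_references_py_alt response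
instance (response : String) (out : String) : Decidable (Spec_extract_policy_references_py response out) := by unfold Spec_extract_policy_references_py; infer_instance

-- ===== CLAIM (what is proved, stated in full; the proofs are below) =====
def Claim_equal_extract_policy_references_py : Prop := ∀ (response : String), Dom_extract_policy_references_py response → Spec_extract_policy_references_py response (extract_policy_references_py response)

-- ===== LEMMAS AND PROOFS =====

-- once capture is true, A's loop appends exactly the stripped kept lines
theorem pvLoop_true (ls : List (List Char)) (refs : List (List Char)) :
    ls.foldl pvStepA (refs, true)
    = (refs ++ (ls.filter (fun l => !(PySem.Chars.strip l).isEmpty && !pvMarker l)).map PySem.Chars.strip, true) := by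
  induction ls generalizing refs with
  | nil => simp
  | cons h t ih =>
    rw [List.foldl_cons]
    by_cases hm : pvMarker h = true
    · rw [show pvStepA (refs, true) h = (refs, true) by simp [pvStepA, hm]]
      rw [ih]
      simp [hm]
    · by_cases hs : (PySem.Chars.strip h).isEmpty = true
      · rw [show pvStepA (refs, true) h = (refs, true) by simp [pvStepA, hm, hs]]
        rw [ih]
        simp [hm, hs]
      · rw [show pvStepA (refs, true) h = (refs ++ [PySem.Chars.strip h], true) by
          simp [pvStepA, hm, hs]]
        rw [ih]
        simp [hm, hs]

-- A's full loop from the initial state, characterised by the first marker index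
theorem pvLoop_false (ls : List (List Char)) :
    ls.foldl pvStepA ([], false)
    = match ls.findIdx? pvMarker with
      | none => ([], false)
      | some i => (((ls.drop (i + 1)).filter (fun l => !(PySem.Chars.strip l).isEmpty && !pvMarker l)).map PySem.Chars.strip, true) := by
  induction ls with
  | nil => simp
  | cons h t ih =>
    rw [List.foldl_cons]
    by_cases hm : pvMarker h = true
    · rw [show pvStepA ([], false) h = ([], true) by simp [pvStepA, hm]]
      rw [pvLoop_true]
      simp [List.findIdx?_cons, hm]
    · rw [show pvStepA ([], false) h = ([], false) by simp [pvStepA, hm]]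
      rw [ih]
      simp only [List.findIdx?_cons, hm, Bool.false_eq_true, if_false]
      cases t.findIdx? pvMarker with
      | none => simp
      | some i => simp [List.drop_succ_cons]

-- ===== VERDICT (by name: the statement is the Claim_ definition above) =====
theorem extract_policy_references_py_spec : Claim_equal_extract_policy_references_py := by
  intro response _
  unfold Spec_extract_policy_references_py extract_policy_references_py extract_policy_references_py_alt
  simp only [pvLoop_false]
  cases (PySem.Chars.splitOn response.toList "\n".toList).findIdx? pvMarker with
  | none => simp
  | some i => simp
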